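-- pv_equiv track=rewrite | github.com/jdnCreations/50-challenges-python | area_filling.py | snakefill
-- ===== SOURCE A (Python) =====
-- def snakefill(grid):
--     grid_size = grid * grid
--     snake_size = 1
--     eat_count = 0
--
--     while snake_size < grid_size:
--         snake_size *= 2
--         if snake_size >= grid_size:
--             return eat_count
--         eat_count += 1
--     return eat_count
-- ===== SOURCE B (Python) =====
-- def snakefill(grid):
--     grid_size = grid * grid
--     if grid_size <= 1:
--         return 0
--     return (grid_size - 1).bit_length() - 1
-- ===== Notes on version B (the rewrite author's own statement) =====
-- stated objective: simpler
-- what changed: Replaced the doubling while-loop with the closed form: 0 when grid*grid <= 1, else (grid*grid - 1).bit_length() - 1.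
import Mathlib
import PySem

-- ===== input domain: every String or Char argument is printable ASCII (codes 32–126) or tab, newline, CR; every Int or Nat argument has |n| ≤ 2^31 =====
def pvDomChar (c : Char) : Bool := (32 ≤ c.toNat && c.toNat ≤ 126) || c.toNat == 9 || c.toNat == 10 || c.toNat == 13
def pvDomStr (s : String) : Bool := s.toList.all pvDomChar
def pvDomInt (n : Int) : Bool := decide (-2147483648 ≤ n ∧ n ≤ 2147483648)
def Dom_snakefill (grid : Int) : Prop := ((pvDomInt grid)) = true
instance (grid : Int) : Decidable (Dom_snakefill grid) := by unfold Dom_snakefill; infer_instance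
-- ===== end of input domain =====

-- B replaces A's doubling loop by the closed form (grid² − 1).bit_length() − 1 (0 when grid² ≤ 1): simpler, O(1).

-- ===== PORT A =====
-- A's while-loop as fuel recursion; fuel 64 suffices for every |grid| ≤ 2^31 (grid² ≤ 2^62),
-- so on the whole domain the port computes exactly what the Python loop computes.
def snakefillLoop : Nat → Int → Int → Int → Int
  | 0, _, _, eat_count => eat_count
  | f + 1, grid_size, snake_size, eat_count =>
    if snake_size < grid_size then
      let snake_size' := snake_size * 2
      if snake_size' ≥ grid_size then eat_count
      else snakefillLoop f grid_size snake_size' (eat_count + 1)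
    else eat_count

def snakefill (grid : Int) : Int :=
  snakefillLoop 64 (grid * grid) 1 0

-- ===== PORT B =====
-- bit_length of a nonnegative Python int is Nat.size of its value
def snakefill_alt (grid : Int) : Int :=
  let grid_size := grid * grid
  if grid_size ≤ 1 then 0
  else ((Nat.size (grid_size - 1).toNat : Int)) - 1

-- ===== PRECONDITION & SPEC =====
def Spec_snakefill (grid : Int) (out : Int) : Prop := out = snakefill_alt grid
instance (grid : Int) (out : Int) : Decidable (Spec_snakefill grid out) := by unfold Spec_snakefill; infer_instance

-- ===== CLAIM (what is proved, stated in full; the proofs are below) =====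
def Claim_equal_snakefill : Prop := ∀ (grid : Int), Dom_snakefill grid → Spec_snakefill grid (snakefill grid)

-- ===== LEMMAS AND PROOFS =====

theorem size_div2 (k : ℕ) (h : 1 ≤ k) : Nat.size k = Nat.size (k/2) + 1 := by
  apply le_antisymm
  · rw [Nat.size_le]
    have h1 : k/2 < 2 ^ Nat.size (k/2) := Nat.lt_size_self _
    calc k ≤ 2*(k/2)+1 := by omega
      _ < 2 ^ (Nat.size (k/2) + 1) := by rw [pow_succ]; omega
  · rcases Nat.eq_zero_or_pos (k/2) with h0 | h0
    · rw [h0, Nat.size_zero]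
      have : 0 < Nat.size k := by rw [Nat.lt_size]; simpa using h
      omega
    · have hs : 0 < Nat.size (k/2) := by rw [Nat.lt_size]; rw [pow_zero]; exact h0
      have h2 : 2 ^ (Nat.size (k/2) - 1) ≤ k/2 := by
        rw [← Nat.lt_size]; omega
      have h4 : Nat.size (k/2) - 1 + 1 = Nat.size (k/2) := by omega
      have : 2 ^ Nat.size (k/2) ≤ k := by
        calc 2 ^ Nat.size (k/2) = 2 ^ (Nat.size (k/2) - 1) * 2 := by
              rw [← pow_succ, h4]
          _ ≤ (k/2)*2 := by omega
          _ ≤ k := by omega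
      have := Nat.lt_size.mpr this
      omega

theorem loop_base (f : Nat) (gs snake ec : Int) (h : ¬ snake < gs) :
    snakefillLoop f gs snake ec = ec := by
  cases f <;> simp [snakefillLoop, h]

theorem loop_eq (f : Nat) : ∀ (gs snake ec : Int), 1 ≤ snake → snake < gs →
    gs ≤ snake * 2 ^ f →
    snakefillLoop f gs snake ec = ec + (Nat.size ((gs-1).toNat / snake.toNat) : Int) - 1 := by
  induction f with
  | zero => intro gs snake ec h1 h2 h3; simp at h3; omega
  | succ f ih =>
    intro gs snake ec h1 h2 h3
    have hb : (snake : Int) = ((snake.toNat : Int)) := by omega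
    set a := snake.toNat with ha
    set b := (gs-1).toNat with hbdef
    have hab : a ≤ b := by omega
    have ha1 : 1 ≤ a := by omega
    simp only [snakefillLoop, if_pos h2]
    by_cases hdone : snake * 2 ≥ gs
    · -- b / a = 1
      have hlt : b < 2 * a := by omega
      have : b / a = 1 := by
        have := Nat.div_le_div_right (c := a) hab
        have h5 : 1 ≤ b / a := by rwa [Nat.div_self ha1] at this
        have h6 : b / a < 2 := Nat.div_lt_of_lt_mul (by omega)
        omega
      simp [hdone, this]
    · have hrec := ih gs (snake * 2) (ec + 1) (by omega) (by omega)
        (by have : snake * 2 * 2 ^ f = snake * 2 ^ (f+1) := by ring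
            omega)
      simp only [ge_iff_le, not_le] at hdone
      rw [if_neg (by omega)]
      rw [hrec]
      have h2a : (snake * 2).toNat = a * 2 := by omega
      rw [h2a]
      have hdd : b / (a * 2) = b / a / 2 := (Nat.div_div_eq_div_mul b a 2).symm
      have hba : 1 ≤ b / a := by
        have := Nat.div_le_div_right (c := a) hab
        rwa [Nat.div_self ha1] at this
      have := size_div2 (b / a) hba
      rw [hdd]; omega

theorem pv_sq_le (grid : Int) (h : -2147483648 ≤ grid ∧ grid ≤ 2147483648) :
    grid * grid ≤ 1 * 2 ^ 64 := by nlinarith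

-- ===== VERDICT (by name: the statement is the Claim_ definition above) =====
theorem snakefill_spec : Claim_equal_snakefill := by
  intro grid hdom
  unfold Spec_snakefill snakefill snakefill_alt
  have hd : -2147483648 ≤ grid ∧ grid ≤ 2147483648 := by
    simpa [Dom_snakefill, pvDomInt] using hdom
  by_cases h1 : grid * grid ≤ 1
  · rw [loop_base 64 _ _ _ (by omega)]
    simp [h1]
  · rw [loop_eq 64 (grid * grid) 1 0 (by omega) (by omega) (pv_sq_le grid hd)]
    simp only [if_neg h1]
    simp
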